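-- pv_equiv track=rewrite | github.com/pypi-data/pypi-mirror-7 | packages/pysed/pysed-0.1.9.tar.gz/pysed-0.1.9/pysed/args.py | get_upside
-- ===== SOURCE A (Python) =====
-- def get_upside(arg, char):
--     '''Get any string after char /'''
--
--     i = 0
--     result = []
--     for c in range(len(arg)):
--         i -= 1
--         result.append(arg[i])
--         if arg[i] == char:
--             break
--
--     return ''.join(result[::-1]).replace('/', '')
-- ===== SOURCE B (Python) =====
-- def get_upside(arg, char):
--     '''Get any string after char /'''
--
--     last = None
--     for i, c in enumerate(arg):
--         if c == char:
--             last = i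
--     s = arg if last is None else arg[last:]
--     return s.replace('/', '')
-- ===== Notes on version B (the rewrite author's own statement) =====
-- stated objective: simpler
-- what changed: A walks the string backwards accumulating characters into a list and reverses it; B scans forward once recording the last index where the character matches, then slices the string from that index (or takes the whole string) before stripping '/' (the slice avoids per-character list building).
import Mathlib
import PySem

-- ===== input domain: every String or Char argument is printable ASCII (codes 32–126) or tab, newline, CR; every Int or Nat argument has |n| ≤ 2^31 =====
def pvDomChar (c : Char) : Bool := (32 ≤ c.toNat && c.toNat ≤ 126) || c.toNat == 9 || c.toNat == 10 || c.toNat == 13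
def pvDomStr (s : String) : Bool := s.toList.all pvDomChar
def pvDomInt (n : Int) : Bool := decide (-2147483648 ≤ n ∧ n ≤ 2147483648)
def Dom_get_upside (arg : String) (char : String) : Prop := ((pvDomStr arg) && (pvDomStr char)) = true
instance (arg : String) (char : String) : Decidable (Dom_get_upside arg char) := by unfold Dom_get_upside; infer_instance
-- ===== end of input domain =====

-- B replaces A's backward character-by-character reversed accumulation with a forward
-- last-match-index-then-slice decomposition (objective: simpler); return values proved equal.

-- ===== PORT A =====
-- A's loop: fuel = remaining iterations of 'for c in range(len(arg))', i the running Python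
-- index (decremented before each access), res the accumulator. pyGet? is arg[i]; its 'none'
-- branch is Python's IndexError, unreachable since the loop runs exactly len(arg) times.
def pvLoopA (cs : List Char) (char : List Char) : Nat → Int → List Char → List Char
  | 0, _, res => res
  | n + 1, i, res =>
    let i' := i - 1
    match PySem.List.pyGet? cs i' with
    | none => res
    | some c =>
      let res' := res ++ [c]
      if [c] = char then res' else pvLoopA cs char n i' res'

def get_upside (arg : String) (char : String) : String :=
  let cs := arg.toList
  let res := pvLoopA cs char.toList cs.length 0 []
  PySem.Str.replace (String.ofList res.reverse) "/" ""

-- ===== PORT B =====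
def get_upside_alt (arg : String) (char : String) : String :=
  let cs := arg.toList
  let last := (PySem.List.enumerate cs 0).foldl
      (fun acc p => if [p.2] = char.toList then some p.1 else acc) (none : Option Int)
  let s := match last with
    | none => cs
    | some i => PySem.List.slice cs (some i) none
  PySem.Str.replace (String.ofList s) "/" ""

-- ===== PRECONDITION & SPEC =====
def Spec_get_upside (arg : String) (char : String) (out : String) : Prop := out = get_upside_alt arg char
instance (arg : String) (char : String) (out : String) : Decidable (Spec_get_upside arg char out) := by unfold Spec_get_upside; infer_instance

-- ===== CLAIM (what is proved, stated in full; the proofs are below) =====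
def Claim_equal_get_upside : Prop := ∀ (arg : String) (char : String), Dom_get_upside arg char → Spec_get_upside arg char (get_upside arg char)

-- ===== LEMMAS AND PROOFS =====

-- A's accumulator is a pure prefix: res only ever grows on the right.
theorem pvLoopA_accum (cs : List Char) (char : List Char) :
    ∀ (n : Nat) (i : Int) (res : List Char),
      pvLoopA cs char n i res = res ++ pvLoopA cs char n i [] := by
  intro n
  induction n with
  | zero => intro i res; simp [pvLoopA]
  | succ n ih =>
    intro i res
    simp only [pvLoopA]
    cases h : PySem.List.pyGet? cs (i - 1) with
    | none => simp
    | some c =>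
      by_cases hc : [c] = char
      · simp [hc]
      · simp only [hc, ite_false]
        rw [ih (i - 1) (res ++ [c]), ih (i - 1) ([] ++ [c])]
        simp

-- shift: once the loop on cs ++ [c] has moved past c, it is the loop on cs.
theorem pvLoopA_shift (cs : List Char) (c : Char) (char : List Char) :
    ∀ (n : Nat) (m : Nat) (res : List Char), n + m ≤ cs.length →
      pvLoopA (cs ++ [c]) char n (-(((m + 1 : Nat)) : Int)) res =
        pvLoopA cs char n (-(m : Int)) res := by
  intro n
  induction n with
  | zero => intro m res _; simp [pvLoopA]
  | succ n ih =>
    intro m res h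
    have e1 : -(((m + 1 : Nat)) : Int) - 1 = -(((m + 2 : Nat)) : Int) := by push_cast; ring
    have e2 : -(m : Int) - 1 = -(((m + 1 : Nat)) : Int) := by push_cast; ring
    simp only [pvLoopA, e1, e2]
    rw [PySem.List.pyGet?_neg_natCast (cs ++ [c]) (m + 2) (by omega) (by simp only [List.length_append, List.length_singleton]; omega),
        PySem.List.pyGet?_neg_natCast cs (m + 1) (by omega) (by omega)]
    have hidx : (cs ++ [c])[(cs ++ [c]).length - (m + 2)]? = cs[cs.length - (m + 1)]? := by
      rw [show (cs ++ [c]).length - (m + 2) = cs.length - (m + 1) by simp only [List.length_append, List.length_singleton]; omega,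
          List.getElem?_append_left (by omega)]
    rw [hidx]
    cases hg : cs[cs.length - (m + 1)]? with
    | none => rfl
    | some c' =>
      by_cases hc : [c'] = char
      · simp [hc]
      · simp only [hc, ite_false]
        exact ih (m + 1) (res ++ [c']) (by omega)

-- full-run recursion of A from the right end of the string
theorem pvLoopA_append (cs : List Char) (c : Char) (char : List Char) :
    pvLoopA (cs ++ [c]) char (cs ++ [c]).length 0 [] =
      if [c] = char then [c] else [c] ++ pvLoopA cs char cs.length 0 [] := by
  have hlen : (cs ++ [c]).length = cs.length + 1 := by simp
  rw [hlen]
  simp only [pvLoopA]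
  rw [show (0 : Int) - 1 = -(((0 + 1 : Nat)) : Int) by norm_num,
      PySem.List.pyGet?_neg_natCast (cs ++ [c]) 1 (by omega) (by simp)]
  rw [show (cs ++ [c])[(cs ++ [c]).length - 1]? = some c by simp]
  by_cases hc : [c] = char
  · simp [hc]
  · simp only [hc, ite_false, List.nil_append]
    rw [pvLoopA_shift cs c char cs.length 0 [c] (by omega)]
    rw [show -((0 : Nat) : Int) = (0 : Int) by norm_num]
    rw [pvLoopA_accum cs char cs.length 0 [c]]

-- B's running "last index" value
def pvLast (cs : List Char) (char : List Char) : Option Int :=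
  (PySem.List.enumerate cs 0).foldl
    (fun acc p => if [p.2] = char then some p.1 else acc) (none : Option Int)

theorem pvLast_append (cs : List Char) (c : Char) (char : List Char) :
    pvLast (cs ++ [c]) char =
      if [c] = char then some (cs.length : Int) else pvLast cs char := by
  unfold pvLast
  rw [PySem.List.enumerate_append, List.foldl_append]
  simp

theorem pvLast_bound (char : List Char) :
    ∀ (cs : List Char) (i : Int), pvLast cs char = some i → 0 ≤ i ∧ i < cs.length := by
  intro cs
  induction cs using List.reverseRecOn with
  | nil => intro i h; simp [pvLast, PySem.List.enumerate] at h
  | append_singleton cs c ih =>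
    intro i h
    rw [pvLast_append] at h
    by_cases hc : [c] = char
    · simp [hc] at h
      subst h
      exact ⟨Int.natCast_nonneg _, by simp⟩
    · simp [hc] at h
      have := ih i h
      simp
      omega

-- the crux: A's (reversed) accumulated suffix IS B's slice-from-last-match
theorem pvMain (char : List Char) :
    ∀ (cs : List Char),
      (pvLoopA cs char cs.length 0 []).reverse =
        (match pvLast cs char with
          | none => cs
          | some i => PySem.List.slice cs (some i) none) := by
  intro cs
  induction cs using List.reverseRecOn with
  | nil => simp [pvLoopA, pvLast, PySem.List.enumerate]
  | append_singleton cs c ih =>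
    rw [pvLoopA_append, pvLast_append]
    by_cases hc : [c] = char
    · rw [if_pos hc, if_pos hc]
      show [c].reverse = PySem.List.slice (cs ++ [c]) (some (cs.length : Int)) none
      rw [PySem.List.slice_from_natCast]
      simp
    · rw [if_neg hc, if_neg hc]
      cases hl : pvLast cs char with
      | none =>
        rw [hl] at ih
        have ih' : (pvLoopA cs char cs.length 0 []).reverse = cs := ih
        show ([c] ++ pvLoopA cs char cs.length 0 []).reverse = cs ++ [c]
        rw [List.reverse_append, ih']
        simp
      | some i =>
        have hb := pvLast_bound char cs i hl
        rw [hl] at ih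
        have ih' : (pvLoopA cs char cs.length 0 []).reverse =
            PySem.List.slice cs (some i) none := ih
        show ([c] ++ pvLoopA cs char cs.length 0 []).reverse =
            PySem.List.slice (cs ++ [c]) (some i) none
        rw [List.reverse_append, ih', PySem.List.slice_from cs hb.1,
            PySem.List.slice_from (cs ++ [c]) hb.1,
            List.drop_append_of_le_length (by omega : i.toNat ≤ cs.length)]
        simp

-- ===== VERDICT (by name: the statement is the Claim_ definition above) =====
theorem get_upside_spec : Claim_equal_get_upside := by
  unfold Claim_equal_get_upside
  intro arg char _
  unfold Spec_get_upside get_upside get_upside_alt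
  simp only []
  rw [pvMain char.toList arg.toList]
  rfl
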